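-- pv_equiv track=rewrite | github.com/nishi10mo/AtCoder | practice/AtCoder Beginner Contest/ABC045/C.py | ManyFormulas
-- ===== SOURCE A (Python) =====
-- def ManyFormulas(s):
--   ans = 0
--   n = len(s)
--   for i in range(1 << (n-1)):
--     sm = 0
--     a = s[0]
--     for j in range(n-1):
--       if i & (1 << j):
--         sm += a
--         a = 0
--       a = 10*a + s[j+1]
--     sm += a
--     ans += sm
--   return ans
-- ===== SOURCE B (Python) =====
-- def ManyFormulas(s):
--     # Linear DP over the digits: maintain, across all 2^(k) sign placements on the
--     # processed prefix, the number of placements c, the sum S of the already-closed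
--     # terms, and the sum A of the trailing (still open) number.
--     if not s:
--         return 0
--     c, S, A = 1, 0, s[0]
--     for d in s[1:]:
--         S, A = 2 * S + A, 10 * A + 2 * c * d
--         c *= 2
--     return S + A
-- ===== Notes on version B (the rewrite author's own statement) =====
-- stated objective: faster
-- what changed: Replaced the enumeration of all 2^(n-1) '+'-placements (recomputing each formula digit by digit) with a single left-to-right DP that carries the placement count, the sum of closed terms and the sum of open trailing numbers.
import Mathlib
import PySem

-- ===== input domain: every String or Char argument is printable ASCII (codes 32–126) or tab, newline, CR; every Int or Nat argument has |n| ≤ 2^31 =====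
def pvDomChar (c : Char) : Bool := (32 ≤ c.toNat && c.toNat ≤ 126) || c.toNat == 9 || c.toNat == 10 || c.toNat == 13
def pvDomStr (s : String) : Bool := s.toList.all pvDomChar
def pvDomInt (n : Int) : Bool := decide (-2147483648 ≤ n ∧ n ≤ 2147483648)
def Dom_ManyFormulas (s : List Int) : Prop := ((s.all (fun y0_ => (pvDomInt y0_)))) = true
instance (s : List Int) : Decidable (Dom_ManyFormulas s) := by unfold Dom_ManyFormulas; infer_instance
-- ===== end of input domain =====

-- B replaces A's enumeration of all 2^(n-1) '+'-placements by a single linear DP over the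
-- digits (sum of closed terms / sum of open trailing numbers / placement count): faster.

-- ===== PORT A =====
-- Python: for i in range(1 << (n-1)): inner loop over j in range(n-1); 'i & (1 << j)' is i.testBit j.
-- s[0] / s[j+1] are always in range when s ≠ [] (Pre_); '.getD 0' only totalizes the port.
def ManyFormulas (s : List Int) : Int :=
  let n := s.length
  (List.range (2 ^ (n - 1))).foldl (fun ans i =>
    let p := (List.range (n - 1)).foldl (fun (p : Int × Int) (j : Nat) =>
        let p := if i.testBit j then (p.1 + p.2, (0 : Int)) else p
        (p.1, 10 * p.2 + ((PySem.List.pyGet? s ((j : Int) + 1)).getD 0)))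
      ((0 : Int), (PySem.List.pyGet? s 0).getD 0)
    ans + (p.1 + p.2)) 0

-- ===== PORT B =====
-- state st = (c, S, A): number of placements seen, sum of closed terms, sum of open trailing numbers
def ManyFormulas_alt (s : List Int) : Int :=
  match s with
  | [] => 0
  | h :: t =>
    let st := t.foldl (fun (st : Int × Int × Int) d =>
        (2 * st.1, 2 * st.2.1 + st.2.2, 10 * st.2.2 + 2 * st.1 * d)) ((1 : Int), (0 : Int), h)
    st.2.1 + st.2.2

-- ===== PRECONDITION & SPEC =====
-- Pre_ excludes only the empty list, on which Python A raises ValueError (1 << -1).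
def Pre_ManyFormulas (s : List Int) : Prop := s ≠ []
instance (s : List Int) : Decidable (Pre_ManyFormulas s) := by unfold Pre_ManyFormulas; infer_instance
def pvWitness_ManyFormulas : List Int := [1, 2, 3]

def Spec_ManyFormulas (s : List Int) (out : Int) : Prop := out = ManyFormulas_alt s
instance (s : List Int) (out : Int) : Decidable (Spec_ManyFormulas s out) := by unfold Spec_ManyFormulas; infer_instance

-- ===== CLAIM =====
def Claim_equal_ManyFormulas : Prop := ∀ (s : List Int), Dom_ManyFormulas s → Pre_ManyFormulas s → Spec_ManyFormulas s (ManyFormulas s)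

-- ===== LEMMAS AND PROOFS =====

-- A's inner loop (the value (sm, a) computed for one mask i on input s)
def inA (s : List Int) (i : Nat) : Int × Int :=
  (List.range (s.length - 1)).foldl (fun (p : Int × Int) (j : Nat) =>
      let p := if i.testBit j then (p.1 + p.2, (0 : Int)) else p
      (p.1, 10 * p.2 + ((PySem.List.pyGet? s ((j : Int) + 1)).getD 0)))
    ((0 : Int), (PySem.List.pyGet? s 0).getD 0)

lemma A_eq (s : List Int) :
    ManyFormulas s
      = 0 + ((List.range (2 ^ (s.length - 1))).map
          (fun i => (inA s i).1 + (inA s i).2)).sum :=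
  PySem.List.foldl_add (List.range (2 ^ (s.length - 1))) (fun i => (inA s i).1 + (inA s i).2) 0

-- B's fold with its initial state
def altF (h : Int) (t : List Int) : Int × Int × Int :=
  t.foldl (fun (st : Int × Int × Int) d =>
      (2 * st.1, 2 * st.2.1 + st.2.2, 10 * st.2.2 + 2 * st.1 * d)) ((1 : Int), (0 : Int), h)

lemma alt_eq (h : Int) (t : List Int) :
    ManyFormulas_alt (h :: t) = (altF h t).2.1 + (altF h t).2.2 := rfl

lemma tb_high {m i : ℕ} (hi : i < 2 ^ m) : (2 ^ m + i).testBit m = true := by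
  rw [Nat.testBit_eq_decide_div_mod_eq]
  have h1 : (2 ^ m + i) / 2 ^ m = 1 := by
    rw [Nat.add_comm, Nat.add_div_right i (Nat.two_pow_pos m), Nat.div_eq_of_lt hi]
  simp [h1]

lemma tb_low {m i j : ℕ} (hj : j < m) :
    (2 ^ m + i).testBit j = i.testBit j := by
  rw [Nat.testBit_eq_decide_div_mod_eq, Nat.testBit_eq_decide_div_mod_eq]
  have hj1 : 2 ^ m = 2 ^ j * (2 * (2 ^ (m - j - 1))) := by
    rw [← pow_succ']
    rw [← pow_add]
    congr 1
    omega
  have hpos : 0 < 2 ^ j := Nat.two_pow_pos j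
  rw [hj1, Nat.mul_add_div hpos]
  simp only [decide_eq_decide]
  omega

-- inA on a list extended by one digit at the end, mask i with its new top bit b
-- the inner fold of inA on s' = (h::t) ++ [d], for masks whose low t.length bits agree with i's
lemma inA_prefix (h d : Int) (t : List Int) (i i' : Nat)
    (hbits : ∀ j, j < t.length → i'.testBit j = i.testBit j) :
    (List.range t.length).foldl (fun (p : Int × Int) (j : Nat) =>
        let p := if i'.testBit j then (p.1 + p.2, (0 : Int)) else p
        (p.1, 10 * p.2 + ((PySem.List.pyGet? (h :: (t ++ [d])) ((j : Int) + 1)).getD 0)))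
      ((0 : Int), (PySem.List.pyGet? (h :: (t ++ [d])) 0).getD 0) = inA (h :: t) i := by
  unfold inA
  simp only [List.length_cons, Nat.add_sub_cancel]
  have h0 : PySem.List.pyGet? (h :: (t ++ [d])) 0 = PySem.List.pyGet? (h :: t) 0 := by
    simp [PySem.List.pyGet?_zero_cons]
  rw [h0]
  refine PySem.List.foldl_congr_mem' _ _ _ _ ?_
  intro j hj p
  have hjm : j < t.length := List.mem_range.mp hj
  have hcast : ((j : Int) + 1) = ((j + 1 : Nat) : Int) := by push_cast; ring
  have hget : PySem.List.pyGet? (h :: (t ++ [d])) ((j : Int) + 1)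
      = PySem.List.pyGet? (h :: t) ((j : Int) + 1) := by
    rw [hcast, PySem.List.pyGet?_natCast, PySem.List.pyGet?_natCast]
    have : (h :: (t ++ [d])) = (h :: t) ++ [d] := by simp
    rw [this, List.getElem?_append_left (by simp; omega)]
  rw [hbits j hjm, hget]

lemma inA_append (h d : Int) (t : List Int) (i : Nat) (hi : i < 2 ^ t.length) :
    (inA (h :: (t ++ [d])) i = ((inA (h :: t) i).1, 10 * (inA (h :: t) i).2 + d)) ∧
    (inA (h :: (t ++ [d])) (2 ^ t.length + i)
        = ((inA (h :: t) i).1 + (inA (h :: t) i).2, d)) := by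
  have hlast : PySem.List.pyGet? (h :: (t ++ [d])) (((t.length : Int)) + 1) = some d := by
    have hc : ((t.length : Int) + 1) = (((h :: t).length : Nat) : Int) := by simp
    have hsplit : (h :: (t ++ [d])) = (h :: t) ++ d :: [] := by simp
    rw [hsplit, hc, PySem.List.pyGet?_append_length]
  constructor
  · have hx : inA (h :: (t ++ [d])) i
        = (fun (p : Int × Int) (j : Nat) =>
            let p := if i.testBit j then (p.1 + p.2, (0 : Int)) else p
            (p.1, 10 * p.2 + ((PySem.List.pyGet? (h :: (t ++ [d])) ((j : Int) + 1)).getD 0)))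
          ((List.range t.length).foldl (fun (p : Int × Int) (j : Nat) =>
              let p := if i.testBit j then (p.1 + p.2, (0 : Int)) else p
              (p.1, 10 * p.2 + ((PySem.List.pyGet? (h :: (t ++ [d])) ((j : Int) + 1)).getD 0)))
            ((0 : Int), (PySem.List.pyGet? (h :: (t ++ [d])) 0).getD 0)) t.length := by
      unfold inA
      rw [show (h :: (t ++ [d])).length - 1 = t.length + 1 by simp,
          List.range_succ, List.foldl_append, List.foldl_cons, List.foldl_nil]
    rw [hx, inA_prefix h d t i i (fun _ _ => rfl)]
    simp only [Nat.testBit_eq_false_of_lt hi, if_neg Bool.false_ne_true, hlast]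
    simp
  · have hx : inA (h :: (t ++ [d])) (2 ^ t.length + i)
        = (fun (p : Int × Int) (j : Nat) =>
            let p := if (2 ^ t.length + i).testBit j then (p.1 + p.2, (0 : Int)) else p
            (p.1, 10 * p.2 + ((PySem.List.pyGet? (h :: (t ++ [d])) ((j : Int) + 1)).getD 0)))
          ((List.range t.length).foldl (fun (p : Int × Int) (j : Nat) =>
              let p := if (2 ^ t.length + i).testBit j then (p.1 + p.2, (0 : Int)) else p
              (p.1, 10 * p.2 + ((PySem.List.pyGet? (h :: (t ++ [d])) ((j : Int) + 1)).getD 0)))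
            ((0 : Int), (PySem.List.pyGet? (h :: (t ++ [d])) 0).getD 0)) t.length := by
      unfold inA
      rw [show (h :: (t ++ [d])).length - 1 = t.length + 1 by simp,
          List.range_succ, List.foldl_append, List.foldl_cons, List.foldl_nil]
    rw [hx, inA_prefix h d t i _ (fun j hj => tb_low hj)]
    simp only [tb_high hi, hlast]
    simp

lemma main_inv (h : Int) (t : List Int) :
    altF h t = (((2 : Int) ^ t.length),
      ((List.range (2 ^ t.length)).map (fun i => (inA (h :: t) i).1)).sum,
      ((List.range (2 ^ t.length)).map (fun i => (inA (h :: t) i).2)).sum) := by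
  induction t using List.reverseRecOn with
  | nil =>
    simp [altF, inA]
  | append_singleton t d ih =>
    have hstep : altF h (t ++ [d])
        = (2 * (altF h t).1, 2 * (altF h t).2.1 + (altF h t).2.2,
           10 * (altF h t).2.2 + 2 * (altF h t).1 * d) := by
      unfold altF
      rw [List.foldl_append, List.foldl_cons, List.foldl_nil]
    have hlen : (t ++ [d]).length = t.length + 1 := by simp
    have hpow : 2 ^ (t.length + 1) = 2 ^ t.length + 2 ^ t.length := by
      rw [pow_succ]; omega
    have hr : List.range (2 ^ (t.length + 1))
        = List.range (2 ^ t.length) ++ (List.range (2 ^ t.length)).map (fun x => 2 ^ t.length + x) := by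
      rw [hpow, List.range_add]
    have h1 : ∀ i ∈ List.range (2 ^ t.length),
        inA (h :: (t ++ [d])) i = ((inA (h :: t) i).1, 10 * (inA (h :: t) i).2 + d) :=
      fun i hi => (inA_append h d t i (List.mem_range.mp hi)).1
    have h2 : ∀ i ∈ List.range (2 ^ t.length),
        inA (h :: (t ++ [d])) (2 ^ t.length + i)
          = ((inA (h :: t) i).1 + (inA (h :: t) i).2, d) :=
      fun i hi => (inA_append h d t i (List.mem_range.mp hi)).2
    have hconst : ∀ (c : Int), ((List.range (2 ^ t.length)).map (fun (_ : Nat) => c)).sum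
        = (2 : Int) ^ t.length * c := by
      intro c
      rw [List.map_const', List.sum_replicate, List.length_range]
      rw [nsmul_eq_mul]
      push_cast
      ring
    rw [hstep, ih, hlen, hr]
    simp only [List.map_append, List.sum_append, List.map_map, Function.comp_def]
    have e1 : List.map (fun i => (inA (h :: (t ++ [d])) i).1) (List.range (2 ^ t.length))
        = List.map (fun i => (inA (h :: t) i).1) (List.range (2 ^ t.length)) :=
      List.map_congr_left (fun i hi => by rw [h1 i hi])
    have e2 : List.map (fun i => (inA (h :: (t ++ [d])) i).2) (List.range (2 ^ t.length))
        = List.map (fun i => 10 * (inA (h :: t) i).2 + d) (List.range (2 ^ t.length)) :=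
      List.map_congr_left (fun i hi => by rw [h1 i hi])
    have e3 : List.map (fun i => (inA (h :: (t ++ [d])) (2 ^ t.length + i)).1) (List.range (2 ^ t.length))
        = List.map (fun i => (inA (h :: t) i).1 + (inA (h :: t) i).2) (List.range (2 ^ t.length)) :=
      List.map_congr_left (fun i hi => by rw [h2 i hi])
    have e4 : List.map (fun i => (inA (h :: (t ++ [d])) (2 ^ t.length + i)).2) (List.range (2 ^ t.length))
        = List.map (fun (_ : Nat) => d) (List.range (2 ^ t.length)) :=
      List.map_congr_left (fun i hi => by rw [h2 i hi])
    rw [e1, e2, e3, e4, List.sum_map_add, List.sum_map_add,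
        List.sum_map_mul_left, hconst]
    simp only [Prod.mk.injEq]
    refine ⟨by ring, by ring, by ring⟩

-- ===== VERDICT =====
theorem ManyFormulas_spec : Claim_equal_ManyFormulas := by
  intro s _ hpre
  unfold Spec_ManyFormulas
  match s with
  | [] => exact absurd rfl hpre
  | h :: t =>
    rw [A_eq, alt_eq, main_inv]
    simp [List.sum_map_add]
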